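-- pv_equiv track=rewrite | github.com/Sapiens-wx/EEG_CNN | VersatileVersion/labels.py | validate_labels
-- ===== SOURCE A (Python) =====
-- label_map = {
--     "left": {
--         "order" : 0,
--         "abbr": "L",
--         "aliases": ["left", "l"]
--     },
--     "right": {
--         "order" : 1,
--         "abbr": "R",
--         "aliases": ["right", "r"]
--     },
--     "neutral": {
--         "order" : 2,
--         "abbr": "N",
--         "aliases": ["neutral", "n"]
--     },
--     "left-to-right": {
--         "order" : 3,
--         "abbr": "L2R",
--         "aliases": ["left-to-right", "l2r", "ltr"]
--     },
--     "left-to-neutral": {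
--         "order" : 4,
--         "abbr": "L2N",
--         "aliases": ["left-to-neutral", "l2n", "ltn"]
--     },
--     "right-to-left": {
--         "order" : 5,
--         "abbr": "R2L",
--         "aliases": ["right-to-left", "r2l", "rtl"]
--     },
--     "right-to-neutral": {
--         "order" : 6,
--         "abbr": "R2N",
--         "aliases": ["right-to-neutral", "r2n", "rtn"]
--     },
--     "neutral-to-left": {
--         "order" : 7,
--         "abbr": "N2L",
--         "aliases": ["neutral-to-left", "n2l", "ntl"]
--     },
--     "neutral-to-right": {
--         "order" : 8,
--         "abbr": "N2R",
--         "aliases": ["neutral-to-right", "n2r", "ntr"]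
--     }
-- }
--
-- def normalize_label(label):
--     """统一标准化label字符串"""
--     return label.strip().replace(' ', '-').lower()
--
-- def validate_labels(label_str, keep_order=False):
--     """验证并规范化labels，返回标准labels列表和缩写列表
--
--     Args:
--         label_str (str): 逗号分隔的labels
--         keep_order (bool): 若为True则保持输入顺序，若为False则按照order排序
--     """
--     # 分割并标准化输入
--     labels = [normalize_label(lbl) for lbl in label_str.split(',')]
--
--     # 构建别名到标准label的映射
--     alias_to_label = {}
--     for std_label, info in label_map.items():
--         for alias in info["aliases"]:
--             alias_to_label[normalize_label(alias)] = std_label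
--
--     # 验证并转换
--     selected = []
--     abbrs = []
--     invalid_labels = []
--
--     for lbl in labels:
--         if lbl in alias_to_label:
--             std_label = alias_to_label[lbl]
--             selected.append(std_label)
--             abbrs.append(label_map[std_label]["abbr"])
--         else:
--             invalid_labels.append(lbl)
--
--     if not keep_order and not invalid_labels:
--         # 按照order排序
--         label_orders = [(label, label_map[label]["order"]) for label in selected]
--         sorted_labels = [label for label, _ in sorted(label_orders, key=lambda x: x[1])]
--         sorted_abbrs = [label_map[label]["abbr"] for label in sorted_labels]
--
--         selected = sorted_labels
--         abbrs = sorted_abbrs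
--
--     return selected, abbrs, invalid_labels
-- ===== SOURCE B (Python) =====
-- # Same validation pass, but the reorder branch uses a counting pass over the
-- # fixed label table (in `order` order) instead of building & sorting pairs.
-- _ORDER = [
--     ("left", "L", ("left", "l")),
--     ("right", "R", ("right", "r")),
--     ("neutral", "N", ("neutral", "n")),
--     ("left-to-right", "L2R", ("left-to-right", "l2r", "ltr")),
--     ("left-to-neutral", "L2N", ("left-to-neutral", "l2n", "ltn")),
--     ("right-to-left", "R2L", ("right-to-left", "r2l", "rtl")),
--     ("right-to-neutral", "R2N", ("right-to-neutral", "r2n", "rtn")),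
--     ("neutral-to-left", "N2L", ("neutral-to-left", "n2l", "ntl")),
--     ("neutral-to-right", "N2R", ("neutral-to-right", "n2r", "ntr")),
-- ]
-- _LOOKUP = {alias: (std, abbr) for std, abbr, aliases in _ORDER for alias in aliases}
--
-- def validate_labels(label_str, keep_order=False):
--     selected, abbrs, invalid = [], [], []
--     for raw in label_str.split(','):
--         lbl = raw.strip().replace(' ', '-').lower()
--         hit = _LOOKUP.get(lbl)
--         if hit is None:
--             invalid.append(lbl)
--         else:
--             selected.append(hit[0])
--             abbrs.append(hit[1])
--     if invalid or keep_order: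
--         return selected, abbrs, invalid
--     counts = {}
--     for lbl in selected:
--         counts[lbl] = counts.get(lbl, 0) + 1
--     sel2, abb2 = [], []
--     for std, abbr, _ in _ORDER:
--         k = counts.get(std, 0)
--         sel2 += [std] * k
--         abb2 += [abbr] * k
--     return sel2, abb2, invalid
-- ===== Notes on version B (the rewrite author's own statement) =====
-- stated objective: alternative
-- what changed: The reorder branch no longer builds (label, order) pairs and stable-sorts them: B tallies the selected standard labels in a dict and emits each label (and its abbreviation) count-many times while walking the fixed 9-entry label table in order, and the validation pass looks up (standard, abbr) pairs in one flat alias table instead of an alias->label dict plus a second label_map lookup.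
import Mathlib
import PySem

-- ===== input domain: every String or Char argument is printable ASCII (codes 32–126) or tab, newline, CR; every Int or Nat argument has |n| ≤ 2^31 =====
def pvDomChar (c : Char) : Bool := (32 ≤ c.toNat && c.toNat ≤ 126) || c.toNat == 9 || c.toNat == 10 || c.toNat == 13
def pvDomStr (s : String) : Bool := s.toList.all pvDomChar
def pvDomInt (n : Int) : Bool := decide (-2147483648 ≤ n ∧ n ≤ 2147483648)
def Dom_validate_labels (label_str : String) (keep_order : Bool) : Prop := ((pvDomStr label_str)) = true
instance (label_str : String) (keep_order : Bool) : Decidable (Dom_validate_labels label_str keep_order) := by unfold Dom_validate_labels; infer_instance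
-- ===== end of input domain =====

-- B replaces A's pair-building + stable sort in the reorder branch by a counting pass
-- over the fixed label table (objective: alternative; same validation pass, no sort).

-- ===== PORT A =====
structure LInfo where
  order : Int
  abbr : String
  aliases : List String
deriving Repr, DecidableEq

def labelMap : PySem.Dict String LInfo := PySem.Dict.ofList
  [ ("left", ⟨0, "L", ["left", "l"]⟩),
    ("right", ⟨1, "R", ["right", "r"]⟩),
    ("neutral", ⟨2, "N", ["neutral", "n"]⟩),
    ("left-to-right", ⟨3, "L2R", ["left-to-right", "l2r", "ltr"]⟩),
    ("left-to-neutral", ⟨4, "L2N", ["left-to-neutral", "l2n", "ltn"]⟩),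
    ("right-to-left", ⟨5, "R2L", ["right-to-left", "r2l", "rtl"]⟩),
    ("right-to-neutral", ⟨6, "R2N", ["right-to-neutral", "r2n", "rtn"]⟩),
    ("neutral-to-left", ⟨7, "N2L", ["neutral-to-left", "n2l", "ntl"]⟩),
    ("neutral-to-right", ⟨8, "N2R", ["neutral-to-right", "n2r", "ntr"]⟩) ]

def normalize_label (label : String) : String :=
  PySem.Str.lower (PySem.Str.replace (PySem.Str.strip label) " " "-")

-- alias_to_label, built by A's double loop over label_map.items()
def aliasToLabel : PySem.Dict String String :=
  labelMap.items.foldl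
    (fun d p => p.2.aliases.foldl (fun d a => d.insert (normalize_label a) p.1) d)
    PySem.Dict.empty

-- label_str.split(',') never raises (sep ≠ ""), so the .getD [] default is unreachable;
-- label_map[std] is ported as getD with a dummy default (std is always a key of label_map).
def validate_labels (label_str : String) (keep_order : Bool) :
    List String × List String × List String :=
  let labels := ((PySem.Str.split? label_str ",").getD []).map normalize_label
  let t := labels.foldl
    (fun (acc : List String × List String × List String) lbl =>
      match aliasToLabel.get? lbl with
      | some std => (acc.1 ++ [std], acc.2.1 ++ [(labelMap.getD std ⟨0, "", []⟩).abbr], acc.2.2)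
      | none => (acc.1, acc.2.1, acc.2.2 ++ [lbl]))
    ([], [], [])
  if keep_order = false ∧ t.2.2 = [] then
    let label_orders := t.1.map (fun l => (l, (labelMap.getD l ⟨0, "", []⟩).order))
    let sorted_labels := (PySem.List.sorted label_orders (fun x => x.2) false).map (fun x => x.1)
    let sorted_abbrs := sorted_labels.map (fun l => (labelMap.getD l ⟨0, "", []⟩).abbr)
    (sorted_labels, sorted_abbrs, t.2.2)
  else
    (t.1, t.2.1, t.2.2)

-- ===== PORT B =====
def bOrder : List (String × String × List String) :=
  [ ("left", "L", ["left", "l"]),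
    ("right", "R", ["right", "r"]),
    ("neutral", "N", ["neutral", "n"]),
    ("left-to-right", "L2R", ["left-to-right", "l2r", "ltr"]),
    ("left-to-neutral", "L2N", ["left-to-neutral", "l2n", "ltn"]),
    ("right-to-left", "R2L", ["right-to-left", "r2l", "rtl"]),
    ("right-to-neutral", "R2N", ["right-to-neutral", "r2n", "rtn"]),
    ("neutral-to-left", "N2L", ["neutral-to-left", "n2l", "ntl"]),
    ("neutral-to-right", "N2R", ["neutral-to-right", "n2r", "ntr"]) ]

def bLookup : PySem.Dict String (String × String) :=
  bOrder.foldl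
    (fun d e => e.2.2.foldl (fun d a => d.insert a (e.1, e.2.1)) d)
    PySem.Dict.empty

def validate_labels_alt (label_str : String) (keep_order : Bool) :
    List String × List String × List String :=
  let t := ((PySem.Str.split? label_str ",").getD []).foldl
    (fun (acc : List String × List String × List String) raw =>
      let lbl := PySem.Str.lower (PySem.Str.replace (PySem.Str.strip raw) " " "-")
      match bLookup.get? lbl with
      | none => (acc.1, acc.2.1, acc.2.2 ++ [lbl])
      | some hit => (acc.1 ++ [hit.1], acc.2.1 ++ [hit.2], acc.2.2))
    ([], [], [])
  if t.2.2 ≠ [] ∨ keep_order = true then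
    (t.1, t.2.1, t.2.2)
  else
    let counts := t.1.foldl (fun (d : PySem.Dict String Int) x => d.insert x (d.getD x 0 + 1))
      PySem.Dict.empty
    let r := bOrder.foldl
      (fun (acc : List String × List String) e =>
        let k := counts.getD e.1 0
        (acc.1 ++ PySem.List.pyRepeat [e.1] k, acc.2 ++ PySem.List.pyRepeat [e.2.1] k))
      ([], [])
    (r.1, r.2, t.2.2)

-- ===== PRECONDITION & SPEC =====
def Spec_validate_labels (label_str : String) (keep_order : Bool) (out : List String × List String × List String) : Prop := out = validate_labels_alt label_str keep_order
instance (label_str : String) (keep_order : Bool) (out : List String × List String × List String) : Decidable (Spec_validate_labels label_str keep_order out) := by unfold Spec_validate_labels; infer_instance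

-- ===== CLAIM (what is proved, stated in full; the proofs are below) =====
def Claim_equal_validate_labels : Prop := ∀ (label_str : String) (keep_order : Bool), Dom_validate_labels label_str keep_order → Spec_validate_labels label_str keep_order (validate_labels label_str keep_order)

-- ===== LEMMAS AND PROOFS =====

-- the nine standard labels, in `order` order
def stds : List String :=
  ["left","right","neutral","left-to-right","left-to-neutral","right-to-left",
   "right-to-neutral","neutral-to-left","neutral-to-right"]

def ordOf (s : String) : Int := (labelMap.getD s ⟨0, "", []⟩).order
def abbrOf (s : String) : String := (labelMap.getD s ⟨0, "", []⟩).abbr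

-- the alias dictionary A builds, as a literal association list
def aliasItems : List (String × String) :=
  [("left","left"),("l","left"),("right","right"),("r","right"),("neutral","neutral"),("n","neutral"),
   ("left-to-right","left-to-right"),("l2r","left-to-right"),("ltr","left-to-right"),
   ("left-to-neutral","left-to-neutral"),("l2n","left-to-neutral"),("ltn","left-to-neutral"),
   ("right-to-left","right-to-left"),("r2l","right-to-left"),("rtl","right-to-left"),
   ("right-to-neutral","right-to-neutral"),("r2n","right-to-neutral"),("rtn","right-to-neutral"),
   ("neutral-to-left","neutral-to-left"),("n2l","neutral-to-left"),("ntl","neutral-to-left"),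
   ("neutral-to-right","neutral-to-right"),("n2r","neutral-to-right"),("ntr","neutral-to-right")]

set_option maxRecDepth 10000 in
lemma aliasToLabel_eq : aliasToLabel = PySem.Dict.mk aliasItems := by rfl

set_option maxRecDepth 10000 in
lemma bLookup_eq :
    bLookup = PySem.Dict.mk (aliasItems.map (fun p => (p.1, (p.2, abbrOf p.2)))) := by rfl

lemma get?_mk_map {β γ : Type} (g : β → γ) :
    ∀ (l : List (String × β)) (x : String),
      (PySem.Dict.mk (l.map (fun p => (p.1, g p.2)))).get? x
        = ((PySem.Dict.mk l).get? x).map g := by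
  intro l
  induction l with
  | nil => intro x; rfl
  | cons p tl ih =>
    intro x
    rw [List.map_cons, PySem.Dict.get?_mk_cons, PySem.Dict.get?_mk_cons]
    by_cases h : (p.1 == x) = true
    · simp [h]
    · simp [h, ih]

lemma lookup_eq (lbl : String) :
    bLookup.get? lbl = (aliasToLabel.get? lbl).map (fun s => (s, abbrOf s)) := by
  rw [aliasToLabel_eq, bLookup_eq, get?_mk_map (g := fun s => (s, abbrOf s))]

set_option maxRecDepth 10000 in
lemma alias_values_std : ∀ p ∈ aliasItems, p.2 ∈ stds := by decide

lemma lookup_mem {lbl std : String} (h : aliasToLabel.get? lbl = some std) : std ∈ stds := by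
  rw [aliasToLabel_eq] at h
  exact alias_values_std _ (PySem.Dict.mem_items_of_get?_eq_some _ h)

set_option maxRecDepth 10000 in
lemma inj_stds : ∀ a ∈ stds, ∀ b ∈ stds, ordOf a = ordOf b → a = b := by decide

set_option maxRecDepth 10000 in
lemma pw_stds : stds.Pairwise (fun a b => ordOf a < ordOf b) := by decide

lemma nodup_stds : stds.Nodup := by decide

lemma uniq (l1 l2 : List String) (hp : l1.Perm l2)
    (h1 : l1.Pairwise (fun a b => ordOf a ≤ ordOf b))
    (h2 : l2.Pairwise (fun a b => ordOf a ≤ ordOf b))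
    (hm : ∀ s ∈ l1, s ∈ stds) : l1 = l2 := by
  have hmap : l1.map ordOf = l2.map ordOf :=
    List.Perm.eq_of_pairwise (fun a b _ _ hab hba => le_antisymm hab hba)
      (List.pairwise_map.mpr h1) (List.pairwise_map.mpr h2) (hp.map ordOf)
  apply List.ext_getElem hp.length_eq
  intro i hi1 hi2
  have ho : ordOf l1[i] = ordOf l2[i] := by
    have h := List.getElem_of_eq hmap (by simpa using hi1)
    simpa using h
  exact inj_stds _ (hm _ (List.getElem_mem _)) _ (hm _ (hp.mem_iff.mpr (List.getElem_mem _))) ho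

lemma count_flatMap_repl (g : String → Nat) :
    ∀ (t : List String), t.Nodup → ∀ b,
      (t.flatMap fun s => List.replicate (g s) s).count b = if b ∈ t then g b else 0 := by
  intro t
  induction t with
  | nil => simp
  | cons a t ih =>
    intro hnd b
    rcases List.nodup_cons.mp hnd with ⟨ha, hndt⟩
    by_cases hba : b = a
    · subst hba
      simp [List.count_append, ih hndt, ha]
    · simp [List.count_append, List.count_replicate, ih hndt, hba, Ne.symm hba]

lemma pairwise_flatMap_repl (g : String → Nat) :
    ∀ (t : List String), t.Pairwise (fun a b => ordOf a ≤ ordOf b) →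
      (t.flatMap fun s => List.replicate (g s) s).Pairwise (fun a b => ordOf a ≤ ordOf b) := by
  intro t
  induction t with
  | nil => simp
  | cons a t ih =>
    intro hpw
    rcases List.pairwise_cons.mp hpw with ⟨hall, htl⟩
    rw [List.flatMap_cons, List.pairwise_append]
    refine ⟨List.pairwise_replicate.mpr (Or.inr le_rfl), ih htl, ?_⟩
    intro x hx y hy
    rcases List.eq_of_mem_replicate hx with rfl
    rcases List.mem_flatMap.mp hy with ⟨s, hs, hys⟩
    rcases List.eq_of_mem_replicate hys with rfl
    exact hall _ hs

lemma sort_eq (sel : List String) (hm : ∀ s ∈ sel, s ∈ stds) :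
    (PySem.List.sorted (sel.map fun l => (l, ordOf l)) (fun x => x.2) false).map (fun x => x.1)
      = stds.flatMap (fun s => List.replicate (sel.count s) s) := by
  have hsp := PySem.List.sorted_perm (xs := sel.map fun l => (l, ordOf l)) (key := fun x => x.2) false
  have p1 : ((PySem.List.sorted (sel.map fun l => (l, ordOf l)) (fun x => x.2) false).map (fun x => x.1)).Perm sel := by
    have := hsp.map (fun x : String × Int => x.1)
    have h2 : ((fun x : String × Int => x.1) ∘ fun l => (l, ordOf l)) = id := rfl
    simpa [List.map_map, h2] using this
  have p2 : sel.Perm (stds.flatMap (fun s => List.replicate (sel.count s) s)) := by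
    rw [List.perm_iff_count]
    intro b
    rw [count_flatMap_repl _ _ nodup_stds]
    by_cases hb : b ∈ stds
    · simp [hb]
    · simp [hb, List.count_eq_zero.mpr (fun hc => hb (hm _ hc))]
  apply uniq _ _ (p1.trans p2)
  · apply List.pairwise_map.mpr
    have hw := PySem.List.sorted_pairwise (xs := sel.map fun l => (l, ordOf l)) (key := fun x => x.2)
    refine hw.imp_of_mem ?_
    intro p q hp hq h
    have h1 : p.2 = ordOf p.1 := by
      rcases List.mem_map.mp ((PySem.List.mem_sorted _ _ _ _).mp hp) with ⟨l, _, rfl⟩; rfl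
    have h2 : q.2 = ordOf q.1 := by
      rcases List.mem_map.mp ((PySem.List.mem_sorted _ _ _ _).mp hq) with ⟨l, _, rfl⟩; rfl
    rw [h1, h2] at h; exact h
  · exact pairwise_flatMap_repl _ _ (pw_stds.imp le_of_lt)
  · intro s hs
    exact hm _ (p1.mem_iff.mp hs)

-- B's selected-label emission over bOrder is the flatMap over stds
lemma sel_flat (c : String → Nat) :
    bOrder.flatMap (fun e => List.replicate (c e.1) e.1)
      = stds.flatMap (fun s => List.replicate (c s) s) := by
  simp only [bOrder, stds, List.flatMap_cons, List.flatMap_nil]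

-- B's abbreviation emission is the image of its label emission under abbrOf
set_option maxRecDepth 10000 in
lemma abbr_flat (c : String → Nat) :
    (stds.flatMap fun s => List.replicate (c s) s).map abbrOf
      = bOrder.flatMap (fun e => List.replicate (c e.1) e.2.1) := by
  simp only [bOrder, stds, List.flatMap_cons, List.flatMap_nil, List.map_append,
    List.map_replicate, List.append_nil,
    show abbrOf "left" = "L" from rfl, show abbrOf "right" = "R" from rfl,
    show abbrOf "neutral" = "N" from rfl, show abbrOf "left-to-right" = "L2R" from rfl,
    show abbrOf "left-to-neutral" = "L2N" from rfl, show abbrOf "right-to-left" = "R2L" from rfl,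
    show abbrOf "right-to-neutral" = "R2N" from rfl, show abbrOf "neutral-to-left" = "N2L" from rfl,
    show abbrOf "neutral-to-right" = "N2R" from rfl]

-- the two validation loops compute the same step
lemma step_eq (acc : List String × List String × List String) (raw : String) :
    (match bLookup.get? (PySem.Str.lower (PySem.Str.replace (PySem.Str.strip raw) " " "-")) with
     | none => (acc.1, acc.2.1,
         acc.2.2 ++ [PySem.Str.lower (PySem.Str.replace (PySem.Str.strip raw) " " "-")])
     | some hit => (acc.1 ++ [hit.1], acc.2.1 ++ [hit.2], acc.2.2))
    = (match aliasToLabel.get? (PySem.Str.lower (PySem.Str.replace (PySem.Str.strip raw) " " "-")) with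
       | some std => (acc.1 ++ [std], acc.2.1 ++ [(labelMap.getD std ⟨0, "", []⟩).abbr], acc.2.2)
       | none => (acc.1, acc.2.1,
           acc.2.2 ++ [PySem.Str.lower (PySem.Str.replace (PySem.Str.strip raw) " " "-")])) := by
  generalize (PySem.Str.lower (PySem.Str.replace (PySem.Str.strip raw) " " "-")) = lbl
  rw [lookup_eq]
  cases aliasToLabel.get? lbl <;> rfl

-- the validation loop only ever appends standard labels to `selected`
set_option maxRecDepth 10000 in
lemma fold_inv : ∀ (raws : List String) (acc : List String × List String × List String),
    (∀ x ∈ acc.1, x ∈ stds) →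
    ∀ x ∈ (raws.foldl
        (fun (acc : List String × List String × List String) raw =>
          match aliasToLabel.get? (PySem.Str.lower (PySem.Str.replace (PySem.Str.strip raw) " " "-")) with
          | some std => (acc.1 ++ [std], acc.2.1 ++ [(labelMap.getD std ⟨0, "", []⟩).abbr], acc.2.2)
          | none => (acc.1, acc.2.1, acc.2.2 ++ [PySem.Str.lower (PySem.Str.replace (PySem.Str.strip raw) " " "-")])) acc).1,
      x ∈ stds := by
  intro raws
  induction raws with
  | nil => intro acc h1; exact h1
  | cons r tl ih =>
    intro acc h1
    simp only [List.foldl_cons]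
    cases hl : aliasToLabel.get? (PySem.Str.lower (PySem.Str.replace (PySem.Str.strip r) " " "-")) with
    | none =>
      exact ih _ h1
    | some std =>
      apply ih
      intro x hx
      have hx' : x ∈ acc.1 ++ [std] := hx
      rcases List.mem_append.mp hx' with h | h
      · exact h1 _ h
      · rcases List.mem_singleton.mp h with rfl; exact lookup_mem hl

set_option maxRecDepth 10000 in
set_option maxHeartbeats 1000000 in
lemma glue (t : List String × List String × List String) (k : Bool)
    (hmem : ∀ x ∈ t.1, x ∈ stds) :
    (if k = false ∧ t.2.2 = [] then
      ((PySem.List.sorted (t.1.map fun l => (l, (labelMap.getD l ⟨0, "", []⟩).order))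
          (fun x => x.2) false).map (fun x => x.1),
       ((PySem.List.sorted (t.1.map fun l => (l, (labelMap.getD l ⟨0, "", []⟩).order))
          (fun x => x.2) false).map (fun x => x.1)).map
         (fun l => (labelMap.getD l ⟨0, "", []⟩).abbr),
       t.2.2)
     else (t.1, t.2.1, t.2.2))
    = (if t.2.2 ≠ [] ∨ k = true then (t.1, t.2.1, t.2.2)
       else
        ((bOrder.foldl
            (fun (acc : List String × List String) e =>
              (acc.1 ++ PySem.List.pyRepeat [e.1]
                  ((t.1.foldl (fun (d : PySem.Dict String Int) x => d.insert x (d.getD x 0 + 1))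
                    PySem.Dict.empty).getD e.1 0),
               acc.2 ++ PySem.List.pyRepeat [e.2.1]
                  ((t.1.foldl (fun (d : PySem.Dict String Int) x => d.insert x (d.getD x 0 + 1))
                    PySem.Dict.empty).getD e.1 0))) ([], [])).1,
         (bOrder.foldl
            (fun (acc : List String × List String) e =>
              (acc.1 ++ PySem.List.pyRepeat [e.1]
                  ((t.1.foldl (fun (d : PySem.Dict String Int) x => d.insert x (d.getD x 0 + 1))
                    PySem.Dict.empty).getD e.1 0),
               acc.2 ++ PySem.List.pyRepeat [e.2.1]
                  ((t.1.foldl (fun (d : PySem.Dict String Int) x => d.insert x (d.getD x 0 + 1))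
                    PySem.Dict.empty).getD e.1 0))) ([], [])).2,
         t.2.2)) := by
  by_cases hc : k = false ∧ t.2.2 = []
  · rw [if_pos hc, if_neg (fun h => h.elim (fun hne => hne hc.2) (fun hk => by simp [hc.1] at hk))]
    -- reorder branch: A's stable sort vs B's counting pass
    have hcnt : ∀ v : String,
        ((t.1.foldl (fun (d : PySem.Dict String Int) x => d.insert x (d.getD x 0 + 1))
          PySem.Dict.empty).getD v 0) = (t.1.count v : Int) := by
      intro v
      rw [PySem.Dict.getD_foldl_insert_add_one]
      simp
    simp only [PySem.List.foldl_prod_mk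
        (f := fun (a : List String) (e : String × String × List String) =>
          a ++ PySem.List.pyRepeat [e.1]
            ((t.1.foldl (fun (d : PySem.Dict String Int) x => d.insert x (d.getD x 0 + 1))
              PySem.Dict.empty).getD e.1 0))
        (g := fun (a : List String) (e : String × String × List String) =>
          a ++ PySem.List.pyRepeat [e.2.1]
            ((t.1.foldl (fun (d : PySem.Dict String Int) x => d.insert x (d.getD x 0 + 1))
              PySem.Dict.empty).getD e.1 0)),
      PySem.List.foldl_append_eq_flatMap, List.nil_append]
    simp only [hcnt, PySem.List.pyRepeat_singleton, Int.toNat_natCast]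
    have hsort : (PySem.List.sorted (t.1.map fun l => (l, (labelMap.getD l ⟨0, "", []⟩).order))
            (fun x => x.2) false).map (fun x => x.1)
          = stds.flatMap (fun s2 => List.replicate (t.1.count s2) s2) :=
      sort_eq t.1 hmem
    refine Prod.ext ?_ (Prod.ext ?_ rfl)
    · rw [hsort, ← sel_flat]
    · show ((PySem.List.sorted (t.1.map fun l => (l, (labelMap.getD l ⟨0, "", []⟩).order))
            (fun x => x.2) false).map (fun x => x.1)).map abbrOf = _
      rw [hsort, abbr_flat]
  · have hb : t.2.2 ≠ [] ∨ k = true := by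
      rcases not_and_or.mp hc with h | h
      · right; simpa using h
      · left; exact h
    rw [if_neg hc, if_pos hb]

set_option maxRecDepth 10000 in
set_option maxHeartbeats 4000000 in
theorem validate_labels_key (s : String) (k : Bool) :
    validate_labels s k = validate_labels_alt s k := by
  have hinv := fold_inv ((PySem.Str.split? s ",").getD []) ([], [], [])
    (by intro x hx; cases hx)
  unfold validate_labels validate_labels_alt
  simp only [List.foldl_map, normalize_label, step_eq]
  exact glue _ k hinv

-- ===== VERDICT (by name: the statement is the Claim_ definition above) =====
theorem validate_labels_spec : Claim_equal_validate_labels := by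
  intro s k _
  exact validate_labels_key s k
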